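-- pv_equiv track=rewrite | github.com/PEDSnet/tools | services/etl/gitutil.py | dedupe_commits
-- ===== SOURCE A (Python) =====
-- def dedupe_commits(commits):
--     shas = set()
--     filtered = []
--
--     # Evaluate in descending order so the more recent commit is included
--     # in the set.
--     for c in reversed(commits):
--         if c['sha'] in shas:
--             continue
--
--         filtered.append(c)
--         shas.add(c['sha'])
--
--     filtered.reverse()
--     return filtered
-- ===== SOURCE B (Python) =====
-- def dedupe_commits(commits):
--     # Two forward passes: map each sha to the index of its last occurrence,
--     # then keep exactly the commits sitting at their sha's last index.
--     last = {}
--     for i, c in enumerate(commits):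
--         last[c['sha']] = i
--     return [c for i, c in enumerate(commits) if last[c['sha']] == i]
-- ===== Notes on version B (the rewrite author's own statement) =====
-- stated objective: alternative
-- what changed: Replaces the reverse scan with a seen-set plus double list reversal by two forward passes: a dict mapping each sha to its last occurrence index, then a filter keeping the commit whose position equals that last index.
import Mathlib
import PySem

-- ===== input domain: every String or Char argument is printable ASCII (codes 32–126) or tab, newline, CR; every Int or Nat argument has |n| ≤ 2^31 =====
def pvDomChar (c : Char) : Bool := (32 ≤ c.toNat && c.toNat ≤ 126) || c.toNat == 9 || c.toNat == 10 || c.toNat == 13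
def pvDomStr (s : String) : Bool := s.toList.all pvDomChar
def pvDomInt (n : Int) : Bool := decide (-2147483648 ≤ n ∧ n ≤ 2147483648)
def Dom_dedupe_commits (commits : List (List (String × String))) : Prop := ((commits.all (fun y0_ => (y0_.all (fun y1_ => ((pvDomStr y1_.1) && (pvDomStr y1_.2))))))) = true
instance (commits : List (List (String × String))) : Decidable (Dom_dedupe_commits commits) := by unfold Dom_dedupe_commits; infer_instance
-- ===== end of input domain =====

-- B replaces A's reverse scan with a seen-set (and two list reversals) by two forward
-- passes: a last-occurrence-index table, then a filter by index equality (objective: alternative).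


-- ===== PORT A =====
-- c['sha'] (shared accessor of both Pythons), made total with default "";
-- commits without a "sha" key (Python KeyError in both A and B) are excluded by Pre_ below.
def pvSha (c : List (String × String)) : String := (PySem.Dict.mk c).getD "sha" ""

-- loop body of A's 'for c in reversed(commits)'
def pvStepA (st : PySem.Set String × List (List (String × String)))
    (c : List (String × String)) : PySem.Set String × List (List (String × String)) :=
  if pvSha c ∈ st.1 then st else (PySem.Set.add st.1 (pvSha c), st.2 ++ [c])

def dedupe_commits (commits : List (List (String × String))) : List (List (String × String)) :=
  let st := commits.reverse.foldl pvStepA (PySem.Set.empty, [])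
  st.2.reverse

-- ===== PORT B =====
-- loop body of B's 'last[c['sha']] = i'
def pvIns (d : PySem.Dict String Int) (p : Int × List (String × String)) : PySem.Dict String Int :=
  d.insert (pvSha p.2) p.1

def dedupe_commits_alt (commits : List (List (String × String))) : List (List (String × String)) :=
  let last := (PySem.List.enumerate commits).foldl pvIns PySem.Dict.empty
  ((PySem.List.enumerate commits).filter (fun p => last.get? (pvSha p.2) == some p.1)).map (fun p => p.2)

-- ===== PRECONDITION & SPEC =====
-- Pre_ excludes exactly the commits lacking a "sha" key: there both Pythons raise KeyError.
def Pre_dedupe_commits (commits : List (List (String × String))) : Prop :=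
  ∀ c ∈ commits, (PySem.Dict.mk c).contains "sha" = true
instance (commits : List (List (String × String))) : Decidable (Pre_dedupe_commits commits) := by
  unfold Pre_dedupe_commits; infer_instance

def pvWitness_dedupe_commits : (List (List (String × String))) :=
  [[("sha", "a"), ("msg", "one")], [("sha", "b"), ("msg", "two")], [("sha", "a"), ("msg", "three")]]

def Spec_dedupe_commits (commits : List (List (String × String))) (out : List (List (String × String))) : Prop := out = dedupe_commits_alt commits
instance (commits : List (List (String × String))) (out : List (List (String × String))) : Decidable (Spec_dedupe_commits commits out) := by unfold Spec_dedupe_commits; infer_instance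

-- ===== CLAIM (what is proved, stated in full; the proofs are below) =====
def Claim_equal_dedupe_commits : Prop := ∀ (commits : List (List (String × String))), Dom_dedupe_commits commits → Pre_dedupe_commits commits → Spec_dedupe_commits commits (dedupe_commits commits)

-- ===== LEMMAS AND PROOFS =====

-- reference function: keep a commit iff no later commit has the same sha
def pvSpec : List (List (String × String)) → List (List (String × String))
  | [] => []
  | c :: l => if l.any (fun c' => pvSha c' == pvSha c) then pvSpec l else c :: pvSpec l

lemma pvStepA_mem (st : PySem.Set String × List (List (String × String)))
    (c : List (String × String)) (h : pvSha c ∈ st.1) : pvStepA st c = st := by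
  unfold pvStepA; rw [if_pos h]

lemma pvStepA_not_mem (st : PySem.Set String × List (List (String × String)))
    (c : List (String × String)) (h : pvSha c ∉ st.1) :
    pvStepA st c = (PySem.Set.add st.1 (pvSha c), st.2 ++ [c]) := by
  unfold pvStepA; rw [if_neg h]

-- A's seen-set after processing xs contains exactly the initial keys plus the shas of xs
lemma pvFoldA_fst_mem (xs : List (List (String × String))) :
    ∀ (s0 : PySem.Set String) (acc : List (List (String × String))) (x : String),
    x ∈ (xs.foldl pvStepA (s0, acc)).1 ↔ x ∈ s0 ∨ ∃ c ∈ xs, pvSha c = x := by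
  induction xs with
  | nil => intro s0 acc x; simp
  | cons c cs ih =>
    intro s0 acc x
    simp only [List.foldl_cons]
    by_cases h : pvSha c ∈ s0
    · rw [pvStepA_mem _ _ h, ih]
      simp only [List.mem_cons]
      constructor
      · rintro (hx | ⟨c', hc', he⟩)
        · exact Or.inl hx
        · exact Or.inr ⟨c', Or.inr hc', he⟩
      · rintro (hx | ⟨c', hc, he⟩)
        · exact Or.inl hx
        · rcases hc with rfl | hc'
          · exact Or.inl (he ▸ h)
          · exact Or.inr ⟨c', hc', he⟩
    · rw [pvStepA_not_mem _ _ h, ih]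
      simp only [PySem.Set.mem_add, List.mem_cons]
      constructor
      · rintro ((hx | he) | ⟨c', hc', he⟩)
        · exact Or.inl hx
        · exact Or.inr ⟨c, Or.inl rfl, he.symm⟩
        · exact Or.inr ⟨c', Or.inr hc', he⟩
      · rintro (hx | ⟨c', hc, he⟩)
        · exact Or.inl (Or.inl hx)
        · rcases hc with rfl | hc'
          · exact Or.inl (Or.inr he.symm)
          · exact Or.inr ⟨c', hc', he⟩

lemma pvA_eq_spec (l : List (List (String × String))) : dedupe_commits l = pvSpec l := by
  induction l with
  | nil => rfl
  | cons c l ih =>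
    show ((c :: l).reverse.foldl pvStepA (PySem.Set.empty, [])).2.reverse = pvSpec (c :: l)
    rw [List.reverse_cons, List.foldl_append]
    simp only [List.foldl_cons, List.foldl_nil, pvSpec]
    have hmem : pvSha c ∈ (l.reverse.foldl pvStepA (PySem.Set.empty, [])).1 ↔
        l.any (fun c' => pvSha c' == pvSha c) = true := by
      rw [pvFoldA_fst_mem, List.any_eq_true]
      constructor
      · rintro (hx | ⟨c', hc', hx⟩)
        · simp [PySem.Set.empty] at hx
        · exact ⟨c', List.mem_reverse.mp hc', by simp [hx]⟩
      · rintro ⟨c', hc', hx⟩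
        exact Or.inr ⟨c', List.mem_reverse.mpr hc', by simpa using hx⟩
    by_cases h : l.any (fun c' => pvSha c' == pvSha c) = true
    · rw [if_pos h, pvStepA_mem _ _ (hmem.mpr h)]
      exact ih
    · rw [if_neg h, pvStepA_not_mem _ _ (fun hc => h (hmem.mp hc))]
      show ((l.reverse.foldl pvStepA (PySem.Set.empty, [])).2 ++ [c]).reverse = c :: pvSpec l
      rw [List.reverse_append]
      show [c].reverse ++ dedupe_commits l = c :: pvSpec l
      rw [ih]
      rfl

-- B's dict lookup: untouched when the key never occurs in the enumerated tail
lemma pvFoldB_get?_of_not_mem (l : List (List (String × String))) :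
    ∀ (x : String), (∀ c ∈ l, pvSha c ≠ x) → ∀ (t : Int) (d : PySem.Dict String Int),
    ((PySem.List.enumerate l t).foldl pvIns d).get? x = d.get? x := by
  induction l with
  | nil => intro x _ t d; rfl
  | cons c cs ih =>
    intro x hx t d
    rw [PySem.List.enumerate_cons]
    simp only [List.foldl_cons]
    rw [ih x (fun c' hc' => hx c' (List.mem_cons_of_mem _ hc')) (t + 1) (pvIns d (t, c))]
    show (d.insert (pvSha c) t).get? x = d.get? x
    exact PySem.Dict.get?_insert_of_ne d t (hx c List.mem_cons_self).symm

-- B's dict lookup: when the key occurs in the tail, the stored index is at least the start index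
lemma pvFoldB_get?_ge (l : List (List (String × String))) :
    ∀ (x : String), (∃ c ∈ l, pvSha c = x) → ∀ (t : Int) (d : PySem.Dict String Int) (v : Int),
    ((PySem.List.enumerate l t).foldl pvIns d).get? x = some v → t ≤ v := by
  induction l with
  | nil => intro x hx t d v hv; simp at hx
  | cons c cs ih =>
    rintro x hx t d v hv
    rw [PySem.List.enumerate_cons] at hv
    simp only [List.foldl_cons] at hv
    by_cases hcs : ∃ c' ∈ cs, pvSha c' = x
    · have := ih x hcs (t + 1) _ v hv
      omega
    · have hcs' : ∀ c' ∈ cs, pvSha c' ≠ x := by simpa using hcs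
      rw [pvFoldB_get?_of_not_mem cs x hcs'] at hv
      obtain ⟨c', hc', hcx⟩ := hx
      rcases List.mem_cons.mp hc' with rfl | h
      · have hv' : (d.insert (pvSha c') t).get? x = some v := hv
        rw [hcx, PySem.Dict.get?_insert_self] at hv'
        have : t = v := by injection hv'
        omega
      · exact absurd hcx (hcs' c' h)

-- generalized form of B: filter the enumeration from start s against the dict built from d
def pvH (l : List (List (String × String))) (s : Int) (d : PySem.Dict String Int) :
    List (List (String × String)) :=
  let last := (PySem.List.enumerate l s).foldl pvIns d
  ((PySem.List.enumerate l s).filter (fun p => last.get? (pvSha p.2) == some p.1)).map (fun p => p.2)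

lemma pvH_eq_spec (l : List (List (String × String))) :
    ∀ (s : Int) (d : PySem.Dict String Int), pvH l s d = pvSpec l := by
  induction l with
  | nil => intro s d; rfl
  | cons c cs ih =>
    intro s d
    unfold pvH
    rw [PySem.List.enumerate_cons]
    simp only [List.foldl_cons, List.filter_cons]
    set last := (PySem.List.enumerate cs (s + 1)).foldl pvIns (pvIns d (s, c)) with hlast
    have htail : ((PySem.List.enumerate cs (s + 1)).filter
        (fun p => last.get? (pvSha p.2) == some p.1)).map (fun p => p.2) = pvSpec cs := by
      rw [hlast]
      exact ih (s + 1) (pvIns d (s, c))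
    by_cases hany : cs.any (fun c' => pvSha c' == pvSha c) = true
    · have hex : ∃ c' ∈ cs, pvSha c' = pvSha c := by
        obtain ⟨c', hc', h⟩ := List.any_eq_true.mp hany
        exact ⟨c', hc', by simpa using h⟩
      have hcond : (last.get? (pvSha c) == some s) = false := by
        cases hg : last.get? (pvSha c) with
        | none => rfl
        | some v =>
          have hge := pvFoldB_get?_ge cs (pvSha c) hex (s + 1) _ v hg
          simp only [beq_eq_false_iff_ne, ne_eq, Option.some.injEq]
          omega
      rw [hcond]
      simp only [Bool.false_eq_true, if_false]
      rw [htail]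
      simp [pvSpec, hany]
    · have hnone : ∀ c' ∈ cs, pvSha c' ≠ pvSha c := by
        intro c' hc' h
        exact hany (List.any_eq_true.mpr ⟨c', hc', by simp [h]⟩)
      have hcond : (last.get? (pvSha c) == some s) = true := by
        rw [hlast, pvFoldB_get?_of_not_mem cs (pvSha c) hnone]
        show ((d.insert (pvSha c) s).get? (pvSha c) == some s) = true
        rw [PySem.Dict.get?_insert_self]
        simp
      rw [hcond]
      simp only [if_true]
      rw [List.map_cons, htail]
      simp [pvSpec, hany]

lemma pvB_eq_spec (l : List (List (String × String))) : dedupe_commits_alt l = pvSpec l := by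
  have h : dedupe_commits_alt l = pvH l 0 PySem.Dict.empty := rfl
  rw [h, pvH_eq_spec]

-- ===== VERDICT (by name: the statement is the Claim_ definition above) =====
theorem dedupe_commits_spec : Claim_equal_dedupe_commits := by
  intro commits _ _
  unfold Spec_dedupe_commits
  rw [pvA_eq_spec, pvB_eq_spec]
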